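-- pv_equiv track=rewrite | github.com/yuxin101/skills | skills/odrobnik/sudoku/scripts/sudoku_fetcher.py | _zip_classic_sudoku2
-- ===== SOURCE A (Python) =====
-- _BLANK_ENCODES = "0123456789ABCDEFGHIJKLMNOPQRSTUVWXYZabcdefghijklmnopqrstuvwx"
--
-- def _zip_classic_sudoku2(puzzle: str) -> str:
--     """Compress an 81-char puzzle string using SudokuPad's compact classic codec."""
--     if not puzzle:
--         return ""
--     is_digit = lambda ch: ch.isdigit() and ch != "0"
--     digit = puzzle[0] if is_digit(puzzle[0]) else "0"
--     res = []
--     blanks = 0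
--     for i in range(1, len(puzzle)):
--         nxt = puzzle[i] if is_digit(puzzle[i]) else "0"
--         if blanks == 5 or nxt != "0":
--             res.append(_BLANK_ENCODES[int(digit) + blanks * 10])
--             digit = nxt
--             blanks = 0
--         else:
--             blanks += 1
--     res.append(_BLANK_ENCODES[int(digit) + blanks * 10])
--     return "".join(res)
-- ===== SOURCE B (Python) =====
-- _BLANK_ENCODES = "0123456789ABCDEFGHIJKLMNOPQRSTUVWXYZabcdefghijklmnopqrstuvwx"
--
-- def _zip_classic_sudoku2(puzzle: str) -> str:
--     """Compress an 81-char puzzle string using SudokuPad's compact classic codec."""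
--     norm = "".join(ch if ch.isdigit() and ch != "0" else "0" for ch in puzzle)
--     out = []
--     i = 0
--     n = len(norm)
--     while i < n:
--         j = i + 1
--         while j < n and j - i <= 5 and norm[j] == "0":
--             j += 1
--         out.append(_BLANK_ENCODES[int(norm[i]) + (j - i - 1) * 10])
--         i = j
--     return "".join(out)
-- ===== Notes on version B (the rewrite author's own statement) =====
-- stated objective: alternative
-- what changed: Replaces A's stateful flush-on-nonzero-or-5-blanks accumulator loop by a two-phase scheme: normalize the whole string once, then tokenize it by index-jumping (each token = one leader char plus up to 5 following blanks) and encode each token directly.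
import Mathlib
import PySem

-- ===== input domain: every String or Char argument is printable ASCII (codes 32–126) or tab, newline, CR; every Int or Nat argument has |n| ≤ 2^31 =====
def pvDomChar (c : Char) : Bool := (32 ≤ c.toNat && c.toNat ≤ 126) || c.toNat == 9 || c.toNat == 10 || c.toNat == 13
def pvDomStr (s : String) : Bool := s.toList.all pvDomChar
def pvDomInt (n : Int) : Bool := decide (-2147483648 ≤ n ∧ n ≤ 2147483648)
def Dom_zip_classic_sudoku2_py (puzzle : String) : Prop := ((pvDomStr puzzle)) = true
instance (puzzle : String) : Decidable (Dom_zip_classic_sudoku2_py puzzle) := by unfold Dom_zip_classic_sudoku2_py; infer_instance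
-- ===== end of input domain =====

-- B replaces A's stateful flush accumulator by normalize-then-tokenize (alternative decomposition, same cost).
-- Shared context: the codec table and the per-char normalization both Pythons literally share.

def pvBlankEncodes : List Char := "0123456789ABCDEFGHIJKLMNOPQRSTUVWXYZabcdefghijklmnopqrstuvwx".toList

-- ch if ch.isdigit() and ch != "0" else "0"  (on Dom the option/default paths below are never hit)
def pvNorm (c : Char) : Char := if PySem.Chars.isdigit c && !(c == '0') then c else '0'

-- _BLANK_ENCODES[int(d) + b * 10]; int(d) via PySem.Int.ofStr? (never none on Dom: d is '0'..'9'),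
-- index always in range on Dom, so getD defaults are never taken there.
def pvEncode (d : Char) (b : Nat) : Char :=
  (PySem.List.pyGet? pvBlankEncodes ((PySem.Int.ofStr? (String.mk [d])).getD 0 + (b : Int) * 10)).getD ' '

-- ===== PORT A =====
-- the for-loop over range(1, len(puzzle)) as structural recursion over the tail, same state (digit, blanks, res)
def pvLoopA : List Char → Char → Nat → List Char → List Char
  | [], digit, blanks, res => res ++ [pvEncode digit blanks]
  | c :: rest, digit, blanks, res =>
      let nxt := pvNorm c
      if blanks == 5 || !(nxt == '0') then
        pvLoopA rest nxt 0 (res ++ [pvEncode digit blanks])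
      else
        pvLoopA rest digit (blanks + 1) res

def zip_classic_sudoku2_py (puzzle : String) : String :=
  match puzzle.toList with
  | [] => ""
  | p0 :: rest => String.mk (pvLoopA rest (pvNorm p0) 0 [])

-- ===== PORT B =====
-- inner while loop of Source B: consume up to k leading '0's, return (count consumed, remainder)
def pvTakeBlanks : Nat → List Char → Nat × List Char
  | _, [] => (0, [])
  | 0, l => (0, l)
  | k + 1, c :: rest =>
      if c == '0' then
        let p := pvTakeBlanks k rest
        (p.1 + 1, p.2)
      else (0, c :: rest)

theorem pvTakeBlanks_snd_length : ∀ (k : Nat) (l : List Char), (pvTakeBlanks k l).2.length ≤ l.length := by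
  intro k l
  induction l generalizing k with
  | nil => cases k <;> simp [pvTakeBlanks]
  | cons c rest ih =>
      cases k with
      | zero => simp [pvTakeBlanks]
      | succ k =>
          simp only [pvTakeBlanks]
          split
          · simpa using Nat.le_succ_of_le (ih k)
          · simp

-- outer while loop of Source B: one token (leader + up to 5 blanks) per step, encoded directly
def pvTokensB : List Char → List Char
  | [] => []
  | c :: rest =>
      pvEncode c (pvTakeBlanks 5 rest).1 :: pvTokensB (pvTakeBlanks 5 rest).2
termination_by l => l.length
decreasing_by
  have := pvTakeBlanks_snd_length 5 rest
  simp only [List.length_cons]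
  omega

def zip_classic_sudoku2_py_alt (puzzle : String) : String :=
  String.mk (pvTokensB (puzzle.toList.map pvNorm))

-- ===== PRECONDITION & SPEC =====
def Spec_zip_classic_sudoku2_py (puzzle : String) (out : String) : Prop := out = zip_classic_sudoku2_py_alt puzzle
instance (puzzle : String) (out : String) : Decidable (Spec_zip_classic_sudoku2_py puzzle out) := by unfold Spec_zip_classic_sudoku2_py; infer_instance

-- ===== CLAIM (what is proved, stated in full; the proofs are below) =====
def Claim_equal_zip_classic_sudoku2_py : Prop := ∀ (puzzle : String), Dom_zip_classic_sudoku2_py puzzle → Spec_zip_classic_sudoku2_py puzzle (zip_classic_sudoku2_py puzzle)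

-- ===== LEMMAS AND PROOFS =====

-- what A's loop produces from state (digit d, blanks b): the token d completes, then the rest
def pvFrom (d : Char) (b : Nat) (l : List Char) : List Char :=
  pvEncode d (b + (pvTakeBlanks (5 - b) l).1) :: pvTokensB (pvTakeBlanks (5 - b) l).2

theorem pvTakeBlanks_zero (l : List Char) : pvTakeBlanks 0 l = (0, l) := by
  cases l <;> simp [pvTakeBlanks]

theorem pvTakeBlanks_cons_ne (k : Nat) (c : Char) (l : List Char) (h : ¬ c = '0') :
    pvTakeBlanks k (c :: l) = (0, c :: l) := by
  cases k <;> simp [pvTakeBlanks, h]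

theorem pvTokensB_eq (c : Char) (rest : List Char) :
    pvTokensB (c :: rest) = pvFrom c 0 rest := by
  simp [pvTokensB, pvFrom]

theorem pvFrom_blank (d : Char) (b : Nat) (hb : b < 5) (l : List Char) :
    pvFrom d b ('0' :: l) = pvFrom d (b + 1) l := by
  simp only [pvFrom]
  have h1 : 5 - b = (5 - (b + 1)) + 1 := by omega
  rw [h1]
  simp only [pvTakeBlanks, beq_self_eq_true, if_true]
  have h2 : b + ((pvTakeBlanks (5 - (b + 1)) l).1 + 1)
      = b + 1 + (pvTakeBlanks (5 - (b + 1)) l).1 := by omega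
  rw [h2]

theorem pvFrom_flush (d c : Char) (b : Nat) (l : List Char) (h : b = 5 ∨ ¬ c = '0') :
    pvFrom d b (c :: l) = pvEncode d b :: pvFrom c 0 l := by
  have key : pvTakeBlanks (5 - b) (c :: l) = (0, c :: l) := by
    rcases h with h | h
    · subst h; simpa using pvTakeBlanks_zero (c :: l)
    · exact pvTakeBlanks_cons_ne _ c l h
  unfold pvFrom
  rw [key]
  simp [pvTokensB]

theorem pvLoopA_eq_pvFrom : ∀ (l : List Char) (d : Char) (b : Nat) (res : List Char), b ≤ 5 →
    pvLoopA l d b res = res ++ pvFrom d b (l.map pvNorm) := by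
  intro l
  induction l with
  | nil =>
      intro d b res hb
      simp [pvLoopA, pvFrom, pvTakeBlanks, pvTokensB]
  | cons c rest ih =>
      intro d b res hb
      simp only [pvLoopA, List.map_cons]
      by_cases hcond : (b == 5 || !(pvNorm c == '0')) = true
      · rw [if_pos hcond, ih _ 0 _ (by omega),
          pvFrom_flush d (pvNorm c) b (rest.map pvNorm) (by simpa using hcond)]
        simp
      · rw [if_neg hcond]
        have hb5 : ¬ b = 5 := by
          intro h; apply hcond; simp [h]
        have hz : pvNorm c = '0' := by
          by_contra h; apply hcond; simp [h]
        rw [ih d (b + 1) res (by omega), hz,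
          pvFrom_blank d b (by omega) (rest.map pvNorm)]

-- ===== VERDICT (by name: the statement is the Claim_ definition above) =====
theorem zip_classic_sudoku2_py_spec : Claim_equal_zip_classic_sudoku2_py := by
  intro puzzle _
  unfold Spec_zip_classic_sudoku2_py zip_classic_sudoku2_py zip_classic_sudoku2_py_alt
  cases h : puzzle.toList with
  | nil => simp [pvTokensB]; rfl
  | cons p0 rest =>
      simp only [List.map_cons]
      rw [pvTokensB_eq, pvLoopA_eq_pvFrom rest (pvNorm p0) 0 [] (by omega)]
      simp
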